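-- pv_equiv track=rewrite | github.com/BorjaFernandezMunoz/Resoluci-n-de-Problemas-con-OOP-y-TDD---Introducci-n-IA-y-Machine-Learning | list_utils.py | find_streak
-- ===== SOURCE A (Python) =====
-- def find_streak(list, needle, n):
--     """
--     Devuelve True si en list hay n o más needles seguidos y False a todo lo demás
--     """
--     #si n>=0
--     if n>=0:
--         index = 0
--         count = 0
--         roll = False
--
--     # Inicializo el índice, el contador y el indicador de racha
--         while count < n and index < len(list):
--     # Mientras no hay encontrado n needles seguidos o la lista no se haya acabado
--             if needle == list[index]:
--                 roll = True
--                 count = count + 1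
--             else:
--                 roll = False
--                 count = 0
--             index = index + 1
--
--         return count >=n and roll
--
--     else:
--         return False
-- ===== SOURCE B (Python) =====
-- def find_streak(list, needle, n):
--     if n < 1 or n > len(list):
--         return False
--     xs = list
--     while len(xs) >= n:
--         if xs[:n] == [needle] * n:
--             return True
--         xs = xs[1:]
--     return False
-- ===== Notes on version B (the rewrite author's own statement) =====
-- stated objective: alternative
-- what changed: Replaced A's single-pass counter-with-reset scan by a sliding-window search: guard on n, then repeatedly compare the length-n prefix slice of the remaining suffix against [needle]*n and pop the head, returning on the first matching window.
import Mathlib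
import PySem

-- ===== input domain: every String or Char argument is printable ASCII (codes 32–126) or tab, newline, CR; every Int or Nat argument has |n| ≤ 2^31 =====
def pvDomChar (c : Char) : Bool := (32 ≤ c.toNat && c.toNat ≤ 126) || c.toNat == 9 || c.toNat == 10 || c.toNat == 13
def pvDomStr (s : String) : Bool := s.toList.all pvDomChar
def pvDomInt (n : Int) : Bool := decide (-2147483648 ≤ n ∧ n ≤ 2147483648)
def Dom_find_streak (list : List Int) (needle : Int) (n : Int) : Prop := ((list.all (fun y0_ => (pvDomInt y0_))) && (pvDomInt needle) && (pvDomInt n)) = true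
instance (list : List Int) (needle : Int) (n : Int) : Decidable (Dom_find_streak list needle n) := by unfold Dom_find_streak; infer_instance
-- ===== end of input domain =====

-- B replaces A's counter-with-reset scan by a sliding-window prefix-slice search (alternative decomposition, same results).

-- ===== PORT A =====
-- while count < n and index < len(list): … — iterated over the remaining suffix of list,
-- carrying (count, roll); returns the final (count, roll) pair.
def findStreakGo (needle n : Int) : List Int → Int → Bool → Int × Bool
  | [], count, roll => (count, roll)
  | x :: rest, count, roll =>
    if count < n then
      if needle == x then findStreakGo needle n rest (count + 1) true
      else findStreakGo needle n rest 0 false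
    else (count, roll)

def find_streak (list : List Int) (needle : Int) (n : Int) : Bool :=
  if n ≥ 0 then
    let p := findStreakGo needle n list 0 false
    decide (p.1 ≥ n) && p.2
  else
    false

-- ===== PORT B =====
-- while len(xs) >= n: if xs[:n] == [needle]*n: return True; xs = xs[1:]
-- (for xs = [] the loop condition len(xs) >= n is written out too; it is false there
--  since the caller guarantees n >= 1)
def findStreakAltGo (needle n : Int) : List Int → Bool
  | [] => if (0 : Int) ≥ n then false else false
  | x :: rest =>
    if ((x :: rest).length : Int) ≥ n then
      if PySem.List.slice (x :: rest) none (some n) == List.replicate n.toNat needle then true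
      else findStreakAltGo needle n rest
    else false

def find_streak_alt (list : List Int) (needle : Int) (n : Int) : Bool :=
  if n < 1 || n > (list.length : Int) then false
  else findStreakAltGo needle n list

-- ===== PRECONDITION & SPEC =====
def Spec_find_streak (list : List Int) (needle : Int) (n : Int) (out : Bool) : Prop := out = find_streak_alt list needle n
instance (list : List Int) (needle : Int) (n : Int) (out : Bool) : Decidable (Spec_find_streak list needle n out) := by unfold Spec_find_streak; infer_instance

-- ===== CLAIM (what is proved, stated in full; the proofs are below) =====
def Claim_equal_find_streak : Prop := ∀ (list : List Int) (needle : Int) (n : Int), Dom_find_streak list needle n → Spec_find_streak list needle n (find_streak list needle n)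

-- ===== LEMMAS AND PROOFS =====

-- "first m elements exist and equal needle"
def isPref (needle : Int) : Nat → List Int → Bool
  | 0, _ => true
  | _ + 1, [] => false
  | m + 1, x :: xs => (x == needle) && isPref needle m xs

theorem take_beq_replicate (needle : Int) : ∀ (m : Nat) (xs : List Int),
    (List.take m xs == List.replicate m needle) = isPref needle m xs := by
  intro m
  induction m with
  | zero => intro xs; simp [isPref]
  | succ m ih =>
    intro xs
    cases xs with
    | nil => simp [isPref, List.replicate_succ]
    | cons x rest =>
      simp only [List.take_succ_cons, List.replicate_succ, List.cons_beq_cons, isPref, ih]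

theorem isPref_le_length (needle : Int) : ∀ (m : Nat) (xs : List Int),
    isPref needle m xs = true → m ≤ xs.length := by
  intro m
  induction m with
  | zero => intro xs _; omega
  | succ m ih =>
    intro xs h
    cases xs with
    | nil => simp [isPref] at h
    | cons x rest =>
      simp only [isPref, Bool.and_eq_true] at h
      have := ih rest h.2
      simp; omega

theorem altGo_short (needle n : Int) : ∀ (xs : List Int),
    (xs.length : Int) < n → findStreakAltGo needle n xs = false := by
  intro xs
  induction xs with
  | nil => intro h; simp [findStreakAltGo]
  | cons x rest ih =>
    intro h
    simp only [findStreakAltGo, if_neg (show ¬ ((x :: rest).length : Int) ≥ n by omega)]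

theorem altGo_cons (needle n : Int) (hn : 1 ≤ n) (x : Int) (rest : List Int) :
    findStreakAltGo needle n (x :: rest)
      = (isPref needle n.toNat (x :: rest) || findStreakAltGo needle n rest) := by
  have hs : PySem.List.slice (x :: rest) none (some n) = List.take n.toNat (x :: rest) :=
    PySem.List.slice_to _ (by omega)
  by_cases hl : ((x :: rest).length : Int) ≥ n
  · rw [findStreakAltGo, if_pos hl, hs, take_beq_replicate]
    cases h : isPref needle n.toNat (x :: rest) <;> simp [h]
  · rw [findStreakAltGo, if_neg hl]
    have h1 : isPref needle n.toNat (x :: rest) = false := by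
      cases h : isPref needle n.toNat (x :: rest) with
      | false => rfl
      | true => have := isPref_le_length needle n.toNat (x :: rest) h; omega
    have h2 : findStreakAltGo needle n rest = false :=
      altGo_short needle n rest (by simp at hl ⊢; omega)
    simp [h1, h2]

theorem isPref_mono (needle : Int) : ∀ (k : Nat) (xs : List Int), ∀ j : Nat, j ≤ k →
    isPref needle k xs = true → isPref needle j xs = true := by
  intro k
  induction k with
  | zero => intro xs j hj _; interval_cases j; simp [isPref]
  | succ k ih =>
    intro xs j hj h
    cases j with
    | zero => simp [isPref]
    | succ j =>
      cases xs with
      | nil => simp [isPref] at h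
      | cons x rest =>
        simp only [isPref, Bool.and_eq_true] at h ⊢
        exact ⟨h.1, ih rest j (by omega) h.2⟩

theorem isPref_imp_altGo (needle n : Int) (hn : 1 ≤ n) : ∀ xs : List Int,
    isPref needle n.toNat xs = true → findStreakAltGo needle n xs = true := by
  intro xs h
  cases xs with
  | nil =>
    have : n.toNat = n.toNat - 1 + 1 := by omega
    rw [this] at h; simp [isPref] at h
  | cons x rest =>
    rw [altGo_cons needle n hn, h]; simp

theorem go_stop (needle n : Int) (xs : List Int) (count : Int) (roll : Bool)
    (h : ¬ count < n) : findStreakGo needle n xs count roll = (count, roll) := by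
  cases xs <;> simp [findStreakGo, h]

theorem go_main (needle n : Int) (hn : 1 ≤ n) : ∀ (xs : List Int) (count : Int) (roll : Bool),
    0 ≤ count → count < n →
    (decide ((findStreakGo needle n xs count roll).1 ≥ n) && (findStreakGo needle n xs count roll).2)
      = (isPref needle (n - count).toNat xs || findStreakAltGo needle n xs) := by
  intro xs
  induction xs with
  | nil =>
    intro count roll h0 hlt
    have hm : (n - count).toNat = ((n - count).toNat - 1) + 1 := by omega
    simp only [findStreakGo, findStreakAltGo]
    rw [hm]
    simp [isPref, show ¬ n ≤ count by omega]
  | cons x rest ih =>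
    intro count roll h0 hlt
    rw [altGo_cons needle n (by omega)]
    have hpc : (n - count).toNat = ((n - count - 1).toNat) + 1 := by omega
    by_cases hx : needle == x
    · have hx' : (x == needle) = true := by
        simp only [beq_iff_eq] at hx ⊢; omega
      simp only [findStreakGo, if_pos hlt, if_pos hx]
      by_cases hcn : count + 1 < n
      · rw [ih (count + 1) true (by omega) hcn]
        have hp1 : (n - (count + 1)).toNat = (n - count - 1).toNat := by omega
        rw [hp1, hpc]
        simp only [isPref, hx']
        -- goal: pure boolean/or equation; case on the components
        cases h1 : isPref needle (n - count - 1).toNat rest with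
        | true => simp [h1]
        | false =>
          have h2 : isPref needle n.toNat (x :: rest) = false := by
            cases h2 : isPref needle n.toNat (x :: rest) with
            | false => rfl
            | true =>
              have hle : (n - count - 1).toNat ≤ n.toNat := by omega
              have := isPref_mono needle n.toNat (x :: rest) ((n - count - 1).toNat + 1)
                (by omega) h2
              rw [show (n - count - 1).toNat + 1 = (n-count).toNat by omega] at this
              rw [hpc] at this
              simp only [isPref, hx', Bool.true_and] at this
              rw [this] at h1; cases h1
          simp [h2]
      · rw [go_stop needle n rest (count + 1) true hcn]
        have hend : (n - count).toNat = 1 := by omega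
        rw [hpc]
        simp [isPref, hx', show n ≤ count + 1 by omega, show (n - count - 1).toNat = 0 by omega]
    · have hx' : (x == needle) = false := by
        have h : ¬ x = needle := fun hc => hx (by simp [hc])
        simp [h]
      simp only [findStreakGo, if_pos hlt, if_neg hx]
      rw [ih 0 false (by omega) (by omega)]
      rw [hpc]
      simp only [isPref, hx', Bool.false_and, Bool.false_or, Int.sub_zero]
      cases h1 : isPref needle n.toNat rest with
      | false =>
        have h2 : isPref needle n.toNat (x :: rest) = false := by
          cases hnn : n.toNat with
          | zero => omega
          | succ m => simp [isPref, hnn, hx']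
        simp [h2]
      | true =>
        have := isPref_imp_altGo needle n hn rest h1
        simp [this]

-- ===== VERDICT (by name: the statement is the Claim_ definition above) =====
theorem find_streak_spec : Claim_equal_find_streak := by
  intro list needle n _
  unfold Spec_find_streak find_streak find_streak_alt
  by_cases hn : 1 ≤ n
  · have h := go_main needle n hn list 0 false (by omega) (by omega)
    simp only [Int.sub_zero] at h
    rw [if_pos (by omega : n ≥ 0), h]
    have habs : (isPref needle n.toNat list || findStreakAltGo needle n list)
        = findStreakAltGo needle n list := by
      cases h1 : isPref needle n.toNat list with
      | false => simp
      | true => simp [isPref_imp_altGo needle n hn list h1]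
    rw [habs]
    by_cases hg : n > (list.length : Int)
    · rw [altGo_short needle n list (by omega)]
      simp [hg]
    · simp [show ¬ n < 1 by omega, hg]
  · by_cases h0 : n ≥ 0
    · rw [if_pos h0, go_stop needle n list 0 false (by omega)]
      simp [show n < 1 by omega]
    · rw [if_neg h0]
      simp [show n < 1 by omega]
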